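-- pv_equiv track=rewrite | github.com/aymankr/travel-resolver | back/controllers/sentence_controller.py | validate_entities_has_both_locations
-- ===== SOURCE A (Python) =====
-- def validate_entities_has_both_locations(entities):
--     """
--     Check if entities contain at least one departure and one arrival
--     """
--     if not entities or not isinstance(entities, list):
--         return False
--
--     has_departure = False
--     has_arrival = False
--
--     for entity in entities:
--         if isinstance(entity, dict):
--             if entity.get('label') == 'DEPARTURE':
--                 has_departure = True
--             elif entity.get('label') == 'ARRIVAL':
--                 has_arrival = True
--
--             if has_departure and has_arrival:
--                 return True
--
--     return False
-- ===== SOURCE B (Python) =====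
-- def validate_entities_has_both_locations(entities):
--     if not entities or not isinstance(entities, list):
--         return False
--     labels = [e.get('label') for e in entities if isinstance(e, dict)]
--     for i, lab in enumerate(labels):
--         if lab in ('DEPARTURE', 'ARRIVAL'):
--             other = 'ARRIVAL' if lab == 'DEPARTURE' else 'DEPARTURE'
--             return other in labels[i + 1:]
--     return False
-- ===== Notes on version B (the rewrite author's own statement) =====
-- stated objective: alternative
-- what changed: Instead of tracking two boolean flags per iteration, B finds the FIRST entity labelled DEPARTURE or ARRIVAL and then searches only the remaining suffix for the other label (find-first then tail-membership); correct because whichever of the two labels occurs first, the other must occur strictly after it.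
import Mathlib
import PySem

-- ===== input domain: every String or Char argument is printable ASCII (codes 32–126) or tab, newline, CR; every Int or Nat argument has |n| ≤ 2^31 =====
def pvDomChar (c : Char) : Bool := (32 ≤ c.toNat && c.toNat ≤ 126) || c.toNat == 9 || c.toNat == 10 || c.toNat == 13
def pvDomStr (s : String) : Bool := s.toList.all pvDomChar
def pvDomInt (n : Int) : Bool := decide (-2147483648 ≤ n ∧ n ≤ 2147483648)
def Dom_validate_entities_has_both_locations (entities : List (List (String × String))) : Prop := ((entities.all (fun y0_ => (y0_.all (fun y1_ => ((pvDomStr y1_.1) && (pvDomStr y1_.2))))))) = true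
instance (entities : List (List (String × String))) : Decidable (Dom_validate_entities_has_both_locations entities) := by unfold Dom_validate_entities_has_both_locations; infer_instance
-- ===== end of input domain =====

-- B finds the first entity labelled DEPARTURE or ARRIVAL and searches only the tail for the other label, instead of A's two-flag loop; return values agree everywhere.

-- ===== PORT A =====
-- flag-tracking loop with early return, literal port of A's for-loop
def pvLoopA : List (List (String × String)) → Bool → Bool → Bool
  | [], _, _ => false
  | e :: rest, has_departure, has_arrival =>
    let has_departure' := if PySem.Dict.get? (PySem.Dict.mk e) "label" = some "DEPARTURE" then true else has_departure
    let has_arrival' := if ¬ (PySem.Dict.get? (PySem.Dict.mk e) "label" = some "DEPARTURE") ∧ PySem.Dict.get? (PySem.Dict.mk e) "label" = some "ARRIVAL" then true else has_arrival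
    if has_departure' && has_arrival' then true else pvLoopA rest has_departure' has_arrival'

def validate_entities_has_both_locations (entities : List (List (String × String))) : Bool :=
  if entities.isEmpty then false
  else pvLoopA entities false false

-- ===== PORT B =====
-- search for the first DEPARTURE/ARRIVAL label; on finding it, test the remaining suffix for the other label
def pvFindFirst : List (Option String) → Bool
  | [] => false
  | lab :: rest =>
    if lab = some "DEPARTURE" ∨ lab = some "ARRIVAL" then
      let other : Option String := if lab = some "DEPARTURE" then some "ARRIVAL" else some "DEPARTURE"
      rest.contains other
    else pvFindFirst rest

def validate_entities_has_both_locations_alt (entities : List (List (String × String))) : Bool :=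
  if entities.isEmpty then false
  else pvFindFirst (entities.map (fun e => PySem.Dict.get? (PySem.Dict.mk e) "label"))

-- ===== PRECONDITION & SPEC =====
def Spec_validate_entities_has_both_locations (entities : List (List (String × String))) (out : Bool) : Prop := out = validate_entities_has_both_locations_alt entities
instance (entities : List (List (String × String))) (out : Bool) : Decidable (Spec_validate_entities_has_both_locations entities out) := by unfold Spec_validate_entities_has_both_locations; infer_instance

-- ===== CLAIM (what is proved, stated in full; the proofs are below) =====
def Claim_equal_validate_entities_has_both_locations : Prop := ∀ (entities : List (List (String × String))), Dom_validate_entities_has_both_locations entities → Spec_validate_entities_has_both_locations entities (validate_entities_has_both_locations entities)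

-- ===== LEMMAS AND PROOFS =====

theorem pvLoopA_eq (l : List (List (String × String))) (hd ha : Bool) (h : ¬ (hd = true ∧ ha = true)) :
    pvLoopA l hd ha = ((hd || l.any (fun e => decide (PySem.Dict.get? (PySem.Dict.mk e) "label" = some "DEPARTURE"))) &&
                       (ha || l.any (fun e => decide (PySem.Dict.get? (PySem.Dict.mk e) "label" = some "ARRIVAL")))) := by
  induction l generalizing hd ha with
  | nil => cases hd <;> cases ha <;> simp_all [pvLoopA]
  | cons e rest ih =>
    have i1 := ih false false (by simp)
    have i2 := ih true false (by simp)
    have i3 := ih false true (by simp)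
    simp only [pvLoopA, List.any_cons]
    by_cases hD : PySem.Dict.get? (PySem.Dict.mk e) "label" = some "DEPARTURE" <;>
    by_cases hA : PySem.Dict.get? (PySem.Dict.mk e) "label" = some "ARRIVAL"
    · exact absurd (hD.symm.trans hA) (by simp)
    all_goals cases hd <;> cases ha <;> simp_all [i1, i2, i3]

theorem pvFindFirst_eq (l : List (Option String)) :
    pvFindFirst l = (l.contains (some "DEPARTURE") && l.contains (some "ARRIVAL")) := by
  induction l with
  | nil => simp [pvFindFirst]
  | cons lab rest ih =>
    by_cases hD : lab = some "DEPARTURE" <;> by_cases hA : lab = some "ARRIVAL"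
    · exact absurd (hD.symm.trans hA) (by simp)
    all_goals simp_all [pvFindFirst, eq_comm]

-- ===== VERDICT (by name: the statement is the Claim_ definition above) =====
theorem validate_entities_has_both_locations_spec : Claim_equal_validate_entities_has_both_locations := by
  intro entities _
  unfold Spec_validate_entities_has_both_locations
  unfold validate_entities_has_both_locations validate_entities_has_both_locations_alt
  by_cases he : entities.isEmpty
  · simp [he]
  · rw [if_neg he, if_neg he]
    rw [pvLoopA_eq _ _ _ (by simp), pvFindFirst_eq]
    simp only [Bool.false_or]
    rw [Bool.eq_iff_iff]
    simp only [Bool.and_eq_true, List.any_eq_true, List.contains_iff_mem, List.mem_map,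
      decide_eq_true_eq]
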